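-- pv_equiv track=rewrite | github.com/PenguinPiplup/python-code | Leetcode (Late 2024)/65. Valid Number (Hard).py | isDecimal
-- ===== SOURCE A (Python) =====
-- def isDecimal(string):
--     if string == "":
--         return False
--
--     # Remove the optional sign if there is any
--     if string[0] == "+" or string[0] == "-":
--         string = string[1:]
--
--     if string == "" or string == ".":
--         return False
--     else:
--         dot_count = 0
--         for char in string:
--             if not char.isdecimal():
--                 if dot_count == 0 and char == ".":
--                     dot_count += 1
--                 else:
--                     return False
--
--         return True
-- ===== SOURCE B (Python) =====
-- def isDecimal(string):
--     # Strip an optional leading sign, then split on '.' and validate the pieces.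
--     if string[:1] in ("+", "-"):
--         string = string[1:]
--     parts = string.split(".")
--     if len(parts) > 2 or all(p == "" for p in parts):
--         return False
--     return all(ch.isdecimal() for part in parts for ch in part)
-- ===== Notes on version B (the rewrite author's own statement) =====
-- stated objective: simpler
-- what changed: Replaces A's single character loop with a mutable dot_count and early returns by a strip-sign / split-on-the-dot-separator / validate-the-pieces decomposition (more than one piece boundary and all-pieces-empty are rejected up front, then every remaining character must be a decimal digit).
import Mathlib
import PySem

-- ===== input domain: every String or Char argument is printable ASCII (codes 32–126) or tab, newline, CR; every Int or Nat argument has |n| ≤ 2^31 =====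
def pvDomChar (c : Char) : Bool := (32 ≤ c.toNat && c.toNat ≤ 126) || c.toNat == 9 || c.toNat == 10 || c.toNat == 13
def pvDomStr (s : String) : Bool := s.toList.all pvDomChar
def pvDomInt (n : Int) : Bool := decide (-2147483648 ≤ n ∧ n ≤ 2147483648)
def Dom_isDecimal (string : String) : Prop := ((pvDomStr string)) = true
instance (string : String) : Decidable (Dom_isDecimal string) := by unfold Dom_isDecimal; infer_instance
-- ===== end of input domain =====

-- B replaces A's dot_count-tracking character loop by strip-sign / split on '.' / validate the
-- (at most two) pieces — a simpler decomposition, same return value on every input.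
-- char.isdecimal() is ported as PySem.Chars.isdigit: exact on the ASCII domain, where both accept exactly '0'-'9'.

-- ===== PORT A =====
-- the 'for char in string' loop with its dot_count accumulator and early 'return False'
def isDecLoop : List Char → Nat → Bool
  | [], _ => true
  | c :: rest, dc =>
    if ¬ (PySem.Chars.isdigit c = true) then
      if dc = 0 ∧ c = '.' then isDecLoop rest (dc + 1) else false
    else isDecLoop rest dc

def isDecimal (string : String) : Bool :=
  if string = "" then false
  else
    let string1 :=
      if PySem.Str.pyGet? string 0 = some '+' ∨ PySem.Str.pyGet? string 0 = some '-' then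
        PySem.Str.slice string (some 1) none
      else string
    if string1 = "" ∨ string1 = "." then false
    else isDecLoop string1.toList 0

-- ===== PORT B =====
def isDecimal_alt (string : String) : Bool :=
  let s :=
    if PySem.Str.slice string none (some 1) = "+" ∨ PySem.Str.slice string none (some 1) = "-" then
      PySem.Str.slice string (some 1) none
    else string
  -- s.split("."): the separator is non-empty, so split? is always 'some'
  let parts := (PySem.Str.split? s ".").getD []
  if parts.length > 2 ∨ parts.all (fun p => p = "") then false
  else parts.all (fun p => p.toList.all PySem.Chars.isdigit)

-- ===== PRECONDITION & SPEC =====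
def Spec_isDecimal (string : String) (out : Bool) : Prop := out = isDecimal_alt string
instance (string : String) (out : Bool) : Decidable (Spec_isDecimal string out) := by unfold Spec_isDecimal; infer_instance

-- ===== CLAIM (what is proved, stated in full; the proofs are below) =====
def Claim_equal_isDecimal : Prop := ∀ (string : String), Dom_isDecimal string → Spec_isDecimal string (isDecimal string)

-- ===== LEMMAS AND PROOFS =====

-- proof-only model of splitting a char list on '.'
def spDot : List Char → List (List Char)
  | [] => [[]]
  | c :: cs => if c = '.' then [] :: spDot cs else (spDot cs).modifyHead (c :: ·)

theorem spDot_cons (cs : List Char) : ∃ h t, spDot cs = h :: t := by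
  cases cs with
  | nil => exact ⟨[], [], rfl⟩
  | cons c rest =>
    obtain ⟨h, t, hht⟩ := spDot_cons rest
    by_cases hc : c = '.'
    · exact ⟨[], spDot rest, by simp [spDot, hc]⟩
    · exact ⟨c :: h, t, by simp [spDot, hc, hht]⟩

theorem go_eq_spDot (fuel : Nat) (l : List Char) (hf : l.length ≤ fuel)
    (cur : List Char) (acc : List (List Char)) :
    PySem.Chars.splitOn.go ['.'] fuel l cur acc
      = acc.reverse ++ (spDot l).modifyHead (cur.reverse ++ ·) := by
  induction fuel generalizing l cur acc with
  | zero =>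
    interval_cases hl : l.length
    cases l with
    | nil => simp [PySem.Chars.splitOn.go, spDot]
    | cons c rest => simp at hl
  | succ fuel ih =>
    cases l with
    | nil => simp [PySem.Chars.splitOn.go, spDot]
    | cons c rest =>
      by_cases hc : c = '.'
      · subst hc
        rw [show PySem.Chars.splitOn.go ['.'] (fuel+1) ('.' :: rest) cur acc
              = PySem.Chars.splitOn.go ['.'] fuel rest [] (cur.reverse :: acc) from by
            simp [PySem.Chars.splitOn.go, List.isPrefixOf]]
        rw [ih rest (by simpa using Nat.le_of_succ_le_succ (by simpa using hf)) [] (cur.reverse :: acc)]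
        obtain ⟨h, t, hht⟩ := spDot_cons rest
        simp [spDot, hht]
      · rw [show PySem.Chars.splitOn.go ['.'] (fuel+1) (c :: rest) cur acc
              = PySem.Chars.splitOn.go ['.'] fuel rest (c :: cur) acc from by
            simp [PySem.Chars.splitOn.go, List.isPrefixOf,
              show ¬ ('.' = c) from fun h => hc h.symm]]
        rw [ih rest (by simpa using Nat.le_of_succ_le_succ (by simpa using hf)) (c :: cur) acc]
        obtain ⟨h, t, hht⟩ := spDot_cons rest
        simp [spDot, hc, hht]

theorem splitOn_eq_spDot (cs : List Char) :
    PySem.Chars.splitOn cs ['.'] = spDot cs := by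
  rw [PySem.Chars.splitOn, go_eq_spDot (cs.length + 1) cs (by omega) [] []]
  obtain ⟨h, t, hht⟩ := spDot_cons cs
  simp [hht]

-- the loop after the dot was seen: only digits may remain
theorem isDecLoop_one (cs : List Char) :
    isDecLoop cs 1
      = (decide ((spDot cs).length ≤ 1) && (spDot cs).all (fun p => p.all PySem.Chars.isdigit)) := by
  induction cs with
  | nil => simp [isDecLoop, spDot]
  | cons c rest ih =>
    obtain ⟨h, t, hht⟩ := spDot_cons rest
    by_cases hd : PySem.Chars.isdigit c = true
    · have hc : ¬ c = '.' := by
        intro hc; subst hc; simp [PySem.Chars.isdigit] at hd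
      simp [isDecLoop, spDot, hc, hht, ih, hd]
    · by_cases hc : c = '.'
      · subst hc
        have := spDot_cons rest
        simp [isDecLoop, hd, spDot, hht]
      · rw [Bool.not_eq_true] at hd
        simp [isDecLoop, hd, hc, spDot, hht]

-- the loop before any dot: at most one dot, all other chars digits
theorem isDecLoop_zero (cs : List Char) :
    isDecLoop cs 0
      = (decide ((spDot cs).length ≤ 2) && (spDot cs).all (fun p => p.all PySem.Chars.isdigit)) := by
  induction cs with
  | nil => simp [isDecLoop, spDot]
  | cons c rest ih =>
    obtain ⟨h, t, hht⟩ := spDot_cons rest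
    by_cases hd : PySem.Chars.isdigit c = true
    · have hc : ¬ c = '.' := by
        intro hc; subst hc; simp [PySem.Chars.isdigit] at hd
      simp [isDecLoop, hd, spDot, hc, hht, ih]
    · by_cases hc : c = '.'
      · subst hc
        rw [show isDecLoop ('.' :: rest) 0 = isDecLoop rest 1 from by simp [isDecLoop, hd]]
        rw [isDecLoop_one rest]
        have h12 : ((spDot rest).length + 1 ≤ 2) = ((spDot rest).length ≤ 1) :=
          propext (by omega)
        simp [spDot, h12]
      · rw [Bool.not_eq_true] at hd
        simp [isDecLoop, hd, hc, spDot, hht]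

theorem spDot_length (cs : List Char) : (spDot cs).length = cs.count '.' + 1 := by
  induction cs with
  | nil => simp [spDot]
  | cons c rest ih =>
    by_cases hc : c = '.' <;> simp [spDot, hc, ih]

theorem spDot_allEmpty (cs : List Char) :
    ((spDot cs).all (fun p => p.isEmpty)) = cs.all (fun c => c = '.') := by
  induction cs with
  | nil => simp [spDot]
  | cons c rest ih =>
    obtain ⟨h, t, hht⟩ := spDot_cons rest
    by_cases hc : c = '.' <;> simp [spDot, hc, ← ih, hht]

-- the list-level core: A's emptiness/lone-dot checks + loop  =  B's checks on the split pieces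
theorem key_list (ds : List Char) :
    (if ds = [] ∨ ds = ['.'] then false else isDecLoop ds 0)
      = (if (spDot ds).length > 2 ∨ (spDot ds).all (fun p => p.isEmpty) then false
         else (spDot ds).all (fun p => p.all PySem.Chars.isdigit)) := by
  by_cases h0 : ds = []
  · subst h0; simp [spDot]
  by_cases h1 : ds = ['.']
  · subst h1; simp [spDot]
  rw [if_neg (by simp [h0, h1]), isDecLoop_zero]
  by_cases hl : (spDot ds).length > 2
  · simp [hl, show ¬ ((spDot ds).length ≤ 2) from by omega]
  by_cases he : (spDot ds).all (fun p => p.isEmpty) = true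
  · exfalso
    have hdots : ds.all (fun c => c = '.') = true := by rw [← spDot_allEmpty]; exact he
    have hcount : ds.count '.' + 1 ≤ 2 := by rw [← spDot_length]; omega
    cases ds with
    | nil => exact h0 rfl
    | cons c r =>
      simp [List.all_cons] at hdots
      obtain ⟨hc, hr⟩ := hdots
      subst hc
      have hlen : r.count '.' = r.length := by
        rw [List.count_eq_length]
        intro b hb; exact ((hr b hb).symm : '.' = b) ▸ rfl
      simp [List.count_cons] at hcount
      have : r = [] := by
        have : r.length = 0 := by omega
        exact List.length_eq_zero_iff.mp this
      exact h1 (by rw [this])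
  · rw [Bool.not_eq_true] at he
    simp [hl, he, show (spDot ds).length ≤ 2 from by omega]

theorem key_str (t : String) :
    (if t = "" ∨ t = "." then false else isDecLoop t.toList 0)
      = (let parts := (PySem.Str.split? t ".").getD []
         if parts.length > 2 ∨ parts.all (fun p => p = "") then false
         else parts.all (fun p => p.toList.all PySem.Chars.isdigit)) := by
  have hsplit : PySem.Str.split? t "." = some ((spDot t.toList).map String.ofList) := by
    simp [PySem.Str.split?, PySem.Chars.split?, splitOn_eq_spDot]
  have hofl : ∀ q : List Char, (String.ofList q = "") ↔ q.isEmpty = true := by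
    intro q; rw [← String.toList_inj]; simp [List.isEmpty_iff]
  have hempty : (t = "") ↔ t.toList = [] := by rw [← String.toList_inj]; simp
  have hdot : (t = ".") ↔ t.toList = ['.'] := by rw [← String.toList_inj]; simp
  simp only [hsplit, Option.getD_some, List.length_map, List.all_map, Function.comp_def,
    String.toList_ofList, hofl, hempty, hdot, Bool.decide_eq_true]
  exact key_list t.toList

-- ===== VERDICT (by name: the statement is the Claim_ definition above) =====
theorem isDecimal_spec : Claim_equal_isDecimal := by
  intro s _
  unfold Spec_isDecimal isDecimal isDecimal_alt
  cases hcs : s.toList with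
  | nil =>
    have hs : s = "" := by rw [← String.toList_inj]; simp [hcs]
    have hsl : PySem.Str.slice s none (some 1) = "" := by
      rw [← String.toList_inj, PySem.Str.toList_slice, PySem.Chars.slice_eq_listSlice,
        PySem.List.slice_to s.toList (by omega : (0:Int) ≤ 1), hcs]
      simp
    have hnosign : ¬ (PySem.Str.slice s none (some 1) = "+" ∨ PySem.Str.slice s none (some 1) = "-") := by
      rw [hsl]; rintro (h | h) <;> exact absurd h (by decide)
    rw [if_pos hs]
    simp only [if_neg hnosign]
    rw [← key_str s, if_pos (Or.inl hs)]
  | cons c rest =>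
    have hne : ¬ s = "" := by
      intro h; subst h; simp at hcs
    have hget : PySem.Str.pyGet? s 0 = some c := by
      simp [PySem.Str.pyGet?, PySem.List.pyGet?, PySem.List.pyIdx?, hcs]
    have hplus : (PySem.Str.slice s none (some 1) = "+") ↔ c = '+' := by
      rw [← String.toList_inj, PySem.Str.toList_slice, PySem.Chars.slice_eq_listSlice,
        PySem.List.slice_to s.toList (by omega : (0:Int) ≤ 1), hcs]
      simp
    have hminus : (PySem.Str.slice s none (some 1) = "-") ↔ c = '-' := by
      rw [← String.toList_inj, PySem.Str.toList_slice, PySem.Chars.slice_eq_listSlice,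
        PySem.List.slice_to s.toList (by omega : (0:Int) ≤ 1), hcs]
      simp
    simp only [if_neg hne, hget, Option.some.injEq, hplus, hminus]
    by_cases hsign : c = '+' ∨ c = '-'
    · simp only [if_pos hsign]
      exact key_str _
    · simp only [if_neg hsign]
      exact key_str s
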